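-- pv_equiv track=rewrite | github.com/alexeydemin/faang_tasks | amaZon/student_rates.py | findImbalance
-- ===== SOURCE A (Python) =====
-- def findImbalance(rank):
--     if len(rank) == 1:
--         return 0
--     if len(rank) == 2:
--         return 1 if abs(rank[0] - rank[1]) > 1 else 0
--
--     rank.sort()
--     res = 0
--
--     def count_imb(r):
--         cnt = 0
--         for i in range(1, len(r)):
--             if r[i] - r[i - 1] > 1:
--                 cnt += 1
--         return cnt
--
--     for group_len in range(2, len(rank) + 1):
--         i = 0
--         while group_len + i <= len(rank):
--             res += count_imb(rank[i:group_len + i])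
--             i += 1
--
--     return res
-- ===== SOURCE B (Python) =====
-- def findImbalance(rank):
--     # Note: unlike A, B does not sort `rank` in place (return value is identical).
--     s = sorted(rank)
--     n = len(s)
--     return sum((i + 1) * (n - 1 - i) for i in range(n - 1) if s[i + 1] - s[i] > 1)
-- ===== Notes on version B (the rewrite author's own statement) =====
-- stated objective: faster
-- what changed: Instead of enumerating every contiguous window of the sorted list and re-counting its internal gaps (triple loop), B sorts once and adds, for each adjacent gap > 1 at position i, the closed-form number (i+1)*(n-1-i) of windows that span it.
import Mathlib
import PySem

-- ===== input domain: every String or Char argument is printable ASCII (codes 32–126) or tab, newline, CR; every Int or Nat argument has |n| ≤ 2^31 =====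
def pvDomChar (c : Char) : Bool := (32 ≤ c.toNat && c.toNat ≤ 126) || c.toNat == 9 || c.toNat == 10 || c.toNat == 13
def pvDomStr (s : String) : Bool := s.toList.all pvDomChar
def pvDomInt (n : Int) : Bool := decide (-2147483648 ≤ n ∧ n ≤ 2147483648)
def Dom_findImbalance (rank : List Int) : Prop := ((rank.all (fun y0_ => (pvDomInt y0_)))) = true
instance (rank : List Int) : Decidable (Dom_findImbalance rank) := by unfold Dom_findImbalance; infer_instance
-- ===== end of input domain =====

-- B replaces A's triple loop over all windows of the sorted list by one pass over adjacent
-- gaps with the closed-form window count (i+1)*(n-1-i)  (objective: faster, asymptotic).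
-- Note: A sorts `rank` in place (observable mutation); B does not. The equivalence proved
-- here is about the RETURN value only.

-- ===== PORT A =====
def pvCountImb (r : List Int) : Int :=
  (PySem.List.pyRange 1 (PySem.List.len r) 1).foldl
    (fun cnt i =>
      if PySem.List.pyGetD r i 0 - PySem.List.pyGetD r (i - 1) 0 > 1 then cnt + 1 else cnt) 0

-- the while loop, with a fuel bound that only makes the recursion structural
-- (fuel = len+1 always suffices: the loop runs at most len-gl+1 times)
def pvWhile (r : List Int) (gl i res : Int) (fuel : Nat) : Int :=
  match fuel with
  | 0 => res
  | fuel' + 1 =>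
    if gl + i ≤ PySem.List.len r then
      pvWhile r gl (i + 1) (res + pvCountImb (PySem.List.slice r (some i) (some (gl + i)))) fuel'
    else res

def findImbalance (rank : List Int) : Int :=
  if PySem.List.len rank = 1 then 0
  else if PySem.List.len rank = 2 then
    if |PySem.List.pyGetD rank 0 0 - PySem.List.pyGetD rank 1 0| > 1 then 1 else 0
  else
    (PySem.List.pyRange 2 (PySem.List.len (PySem.List.sorted rank (fun x => x) false) + 1) 1).foldl
      (fun res gl => pvWhile (PySem.List.sorted rank (fun x => x) false) gl 0 res
        ((PySem.List.len (PySem.List.sorted rank (fun x => x) false) + 1).toNat)) 0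

-- ===== PORT B =====
def findImbalance_alt (rank : List Int) : Int :=
  (PySem.List.pyRange 0 (PySem.List.len (PySem.List.sorted rank (fun x => x) false) - 1) 1).foldl
    (fun acc i =>
      if PySem.List.pyGetD (PySem.List.sorted rank (fun x => x) false) (i + 1) 0
         - PySem.List.pyGetD (PySem.List.sorted rank (fun x => x) false) i 0 > 1 then
        acc + (i + 1) * (PySem.List.len (PySem.List.sorted rank (fun x => x) false) - 1 - i)
      else acc) 0

-- ===== PRECONDITION & SPEC =====
def Spec_findImbalance (rank : List Int) (out : Int) : Prop := out = findImbalance_alt rank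
instance (rank : List Int) (out : Int) : Decidable (Spec_findImbalance rank out) := by unfold Spec_findImbalance; infer_instance

-- ===== CLAIM (what is proved, stated in full; the proofs are below) =====
def Claim_equal_findImbalance : Prop := ∀ (rank : List Int), Dom_findImbalance rank → Spec_findImbalance rank (findImbalance rank)

-- ===== LEMMAS AND PROOFS =====

-- gap indicator at adjacent position t of s
def pvGap (s : List Int) (t : Nat) : Int :=
  if s.getD (t + 1) 0 - s.getD t 0 > 1 then 1 else 0

-- prefix-sum operator
def pvG (f : Nat → Int) (k : Nat) : Int := ∑ t ∈ Finset.range k, f t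

lemma pvG_succ (f : Nat → Int) (k : Nat) : pvG f (k + 1) = pvG f k + f k :=
  Finset.sum_range_succ f k

lemma pvG_zero (f : Nat → Int) : pvG f 0 = 0 := rfl

-- a foldl that conditionally adds a weight is a sum of ite-weights
lemma pvFoldlIf {α : Type} (P : α → Prop) [DecidablePred P] (w : α → Int) :
    ∀ (l : List α) (acc : Int),
      l.foldl (fun c x => if P x then c + w x else c) acc
        = acc + (l.map (fun x => if P x then w x else 0)).sum := by
  intro l
  induction l with
  | nil => intro acc; simp
  | cons a t ih =>
    intro acc
    by_cases h : P a
    · simp [h, ih]; ring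
    · simp [h, ih]

lemma pvSumRange (f : Nat → Int) (n : Nat) :
    ((List.range n).map f).sum = ∑ i ∈ Finset.range n, f i := by
  induction n with
  | zero => simp
  | succ n ih => rw [List.range_succ, List.map_append, List.sum_append, Finset.sum_range_succ, ih]; simp

-- shift: a sum of f over a window is a difference of prefix sums
lemma pvG_shift (f : Nat → Int) (a : Nat) :
    ∀ b : Nat, ∑ q ∈ Finset.range b, f (a + q) = pvG f (a + b) - pvG f a := by
  intro b
  induction b with
  | zero => simp [pvG]
  | succ b ih =>
    rw [Finset.sum_range_succ, ih, show a + (b + 1) = (a + b) + 1 from rfl, pvG_succ]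
    ring

lemma pvQ (f : Nat → Int) :
    ∀ k : Nat, ∑ t ∈ Finset.range k, ((t : Int) + 1) * f t
      = (k : Int) * pvG f k - pvG (pvG f) k := by
  intro k
  induction k with
  | zero => simp [pvG]
  | succ k ih =>
    rw [Finset.sum_range_succ, ih, pvG_succ f k, pvG_succ (pvG f) k]
    push_cast
    ring

lemma pvP (f : Nat → Int) :
    ∀ m : Nat, ∑ t ∈ Finset.range m, ((t : Int) + 1) * ((m : Int) - (t : Int)) * f t
      = (m : Int) * pvG (pvG f) (m + 1) - 2 * pvG (pvG (pvG f)) (m + 1) := by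
  intro m
  induction m with
  | zero => simp [pvG]
  | succ m ih =>
    have hsplit : ∀ t ∈ Finset.range (m + 1),
        ((t : Int) + 1) * (((m + 1 : Nat) : Int) - (t : Int)) * f t
          = ((t : Int) + 1) * ((m : Int) - (t : Int)) * f t + ((t : Int) + 1) * f t := by
      intro t _; push_cast; ring
    rw [Finset.sum_congr rfl hsplit, Finset.sum_add_distrib,
      Finset.sum_range_succ (fun t => ((t : Int) + 1) * ((m : Int) - (t : Int)) * f t) m,
      ih, pvQ f (m + 1),
      pvG_succ (pvG f) (m + 1), pvG_succ (pvG (pvG f)) (m + 1)]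
    push_cast
    ring

-- ---- program-side characterisations ----

lemma pvCountImb_eq (r : List Int) :
    pvCountImb r = pvG (pvGap r) (r.length - 1) := by
  unfold pvCountImb
  rw [PySem.List.pyRange_one 1 (PySem.List.len r)]
  simp only [PySem.List.len_eq]
  rw [show ((r.length : Int) - 1).toNat = r.length - 1 by omega, List.foldl_map,
    pvFoldlIf (fun k : Nat => PySem.List.pyGetD r (1 + (k : Int)) 0
        - PySem.List.pyGetD r (1 + (k : Int) - 1) 0 > 1) (fun _ => (1 : Int)),
    pvSumRange, zero_add]
  unfold pvG
  refine Finset.sum_congr rfl (fun k _ => ?_)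
  rw [show (1 : Int) + (k : Int) = ((k + 1 : Nat) : Int) by push_cast; ring,
    show ((k + 1 : Nat) : Int) - 1 = ((k : Nat) : Int) by push_cast; ring,
    PySem.List.pyGetD_natCast, PySem.List.pyGetD_natCast]
  rfl

lemma pvGetD_take_drop (r : List Int) (i g t : Nat) (h : t < g) (h2 : i + g ≤ r.length) :
    (List.take g (List.drop i r)).getD t 0 = r.getD (i + t) 0 := by
  rw [List.getD_eq_getElem _ _ (by simp [List.length_take, List.length_drop]; omega),
    List.getD_eq_getElem _ _ (by omega)]
  simp [List.getElem_take, List.getElem_drop]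

lemma pvWindow (r : List Int) (i g : Nat) (h : i + (g + 2) ≤ r.length) :
    pvCountImb (List.take (g + 2) (List.drop i r))
      = pvG (pvGap r) (i + (g + 1)) - pvG (pvGap r) i := by
  rw [pvCountImb_eq]
  have hlen : (List.take (g + 2) (List.drop i r)).length = g + 2 := by
    simp [List.length_take, List.length_drop]; omega
  rw [hlen, show g + 2 - 1 = g + 1 from rfl]
  have hcongr : ∀ t ∈ Finset.range (g + 1),
      pvGap (List.take (g + 2) (List.drop i r)) t = pvGap r (i + t) := by
    intro t ht
    simp only [Finset.mem_range] at ht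
    unfold pvGap
    rw [pvGetD_take_drop r i (g + 2) (t + 1) (by omega) h,
      pvGetD_take_drop r i (g + 2) t (by omega) h]
    rfl
  unfold pvG
  rw [Finset.sum_congr rfl hcongr, pvG_shift (pvGap r) i (g + 1)]
  rfl

lemma pvWhile_eq (r : List Int) (g : Nat) :
    ∀ (c i : Nat) (res : Int) (fuel : Nat), c = r.length + 1 - (g + 2 + i) → c ≤ fuel →
      pvWhile r ((g : Int) + 2) (i : Int) res fuel
        = res + ∑ q ∈ Finset.range c,
            (pvG (pvGap r) (i + q + g + 1) - pvG (pvGap r) (i + q)) := by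
  intro c
  induction c with
  | zero =>
    intro i res fuel hc _
    cases fuel with
    | zero => simp [pvWhile]
    | succ fuel' =>
      rw [pvWhile]
      rw [if_neg (by simp only [PySem.List.len_eq]; omega)]
      simp
  | succ c ih =>
    intro i res fuel hc hf
    have hle : g + 2 + i ≤ r.length := by omega
    obtain ⟨fuel', rfl⟩ : ∃ f', fuel = f' + 1 := ⟨fuel - 1, by omega⟩
    rw [pvWhile]
    rw [if_pos (by simp only [PySem.List.len_eq]; omega)]
    have hsl : PySem.List.slice r (some (i : Int)) (some ((g : Int) + 2 + (i : Int)))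
        = List.take (g + 2) (List.drop i r) := by
      rw [PySem.List.slice_toNat r (by positivity) (by positivity)]
      rw [show ((g : Int) + 2 + (i : Int)) = ((g + 2 + i : Nat) : Int) by omega]
      simp only [Int.toNat_natCast]
      rw [show g + 2 + i - i = g + 2 by omega]
    rw [hsl, pvWindow r i g (by omega)]
    have hstep : ((i : Int) + 1) = ((i + 1 : Nat) : Int) := by push_cast; ring
    rw [hstep, ih (i + 1) _ fuel' (by omega) (by omega)]
    rw [Finset.sum_range_succ' (fun q => pvG (pvGap r) (i + q + g + 1) - pvG (pvGap r) (i + q)) c]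
    have hidx : ∀ q ∈ Finset.range c,
        pvG (pvGap r) (i + 1 + q + g + 1) - pvG (pvGap r) (i + 1 + q)
          = pvG (pvGap r) (i + (q + 1) + g + 1) - pvG (pvGap r) (i + (q + 1)) := by
      intro q _
      rw [show i + 1 + q + g + 1 = i + (q + 1) + g + 1 by omega,
        show i + 1 + q = i + (q + 1) by omega]
    rw [Finset.sum_congr rfl hidx]
    rw [show i + 0 + g + 1 = i + (g + 1) by omega, show i + 0 = i by omega]
    ring

lemma pvA_else (s : List Int) :
    (PySem.List.pyRange 2 (PySem.List.len s + 1) 1).foldl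
      (fun res gl => pvWhile s gl 0 res ((PySem.List.len s + 1).toNat)) 0
      = ∑ k ∈ Finset.range (s.length - 1), ∑ q ∈ Finset.range (s.length - 1 - k),
          (pvG (pvGap s) (q + k + 1) - pvG (pvGap s) q) := by
  rw [PySem.List.pyRange_one 2 (PySem.List.len s + 1)]
  simp only [PySem.List.len_eq]
  rw [show ((s.length : Int) + 1 - 2).toNat = s.length - 1 by omega, List.foldl_map]
  have hbody : (fun (res : Int) (k : Nat) =>
        pvWhile s (2 + (k : Int)) 0 res (((s.length : Int) + 1).toNat))
      = fun (res : Int) (k : Nat) => res + ∑ q ∈ Finset.range (s.length - 1 - k),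
          (pvG (pvGap s) (q + k + 1) - pvG (pvGap s) q) := by
    funext res k
    rw [show (2 : Int) + (k : Int) = (k : Int) + 2 by ring,
      show (0 : Int) = ((0 : Nat) : Int) from rfl,
      show (((s.length : Int)) + 1).toNat = s.length + 1 by omega,
      pvWhile_eq s k (s.length - 1 - k) 0 res (s.length + 1) (by omega) (by omega)]
    refine congrArg (fun z => res + z) (Finset.sum_congr rfl (fun q _ => ?_))
    rw [show 0 + q + k + 1 = q + k + 1 by omega, show 0 + q = q by omega]
  rw [hbody, PySem.List.foldl_add, pvSumRange]
  simp

lemma pvCombine (f : Nat → Int) (m : Nat) :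
    ∑ k ∈ Finset.range m, ∑ q ∈ Finset.range (m - k), (pvG f (q + k + 1) - pvG f q)
      = ∑ t ∈ Finset.range m, ((t : Int) + 1) * ((m : Int) - (t : Int)) * f t := by
  have hinner : ∀ k ∈ Finset.range m,
      ∑ q ∈ Finset.range (m - k), (pvG f (q + k + 1) - pvG f q)
        = pvG (pvG f) (m + 1) - pvG (pvG f) (k + 1) - pvG (pvG f) (m - k) := by
    intro k hk
    simp only [Finset.mem_range] at hk
    rw [Finset.sum_sub_distrib]
    have h1 : ∑ q ∈ Finset.range (m - k), pvG f (q + k + 1)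
        = pvG (pvG f) (m + 1) - pvG (pvG f) (k + 1) := by
      have := pvG_shift (pvG f) (k + 1) (m - k)
      rw [show (k + 1) + (m - k) = m + 1 by omega] at this
      rw [← this]
      refine Finset.sum_congr rfl (fun q _ => ?_)
      rw [show k + 1 + q = q + k + 1 by omega]
    have h2 : ∑ q ∈ Finset.range (m - k), pvG f q = pvG (pvG f) (m - k) := rfl
    rw [h1, h2]
  rw [Finset.sum_congr rfl hinner, pvP f m]
  rw [Finset.sum_sub_distrib, Finset.sum_sub_distrib]
  have hrefl : ∑ k ∈ Finset.range m, pvG (pvG f) (m - k)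
      = ∑ k ∈ Finset.range m, pvG (pvG f) (k + 1) := by
    rw [← Finset.sum_range_reflect (fun j => pvG (pvG f) (j + 1)) m]
    refine Finset.sum_congr rfl (fun k hk => ?_)
    simp only [Finset.mem_range] at hk
    rw [show m - 1 - k + 1 = m - k by omega]
  have hK : ∑ k ∈ Finset.range m, pvG (pvG f) (k + 1) = pvG (pvG (pvG f)) (m + 1) := by
    have : pvG (pvG (pvG f)) (m + 1) = ∑ j ∈ Finset.range (m + 1), pvG (pvG f) j := rfl
    rw [this, Finset.sum_range_succ' (fun j => pvG (pvG f) j) m, pvG_zero, add_zero]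
  rw [hrefl, hK, Finset.sum_const, Finset.card_range, nsmul_eq_mul]
  ring

lemma pvAlt_eq (rank : List Int) :
    findImbalance_alt rank
      = ∑ k ∈ Finset.range ((PySem.List.sorted rank (fun x => x) false).length - 1),
          ((k : Int) + 1)
            * ((((PySem.List.sorted rank (fun x => x) false).length - 1 : Nat) : Int) - (k : Int))
            * pvGap (PySem.List.sorted rank (fun x => x) false) k := by
  unfold findImbalance_alt
  rw [PySem.List.pyRange_one 0 (PySem.List.len (PySem.List.sorted rank (fun x => x) false) - 1)]
  simp only [PySem.List.len_eq, zero_add]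
  set s := PySem.List.sorted rank (fun x => x) false with hs
  rw [show ((s.length : Int) - 1 - 0).toNat = s.length - 1 by omega, List.foldl_map,
    pvFoldlIf (fun k : Nat => PySem.List.pyGetD s ((k : Int) + 1) 0
        - PySem.List.pyGetD s ((k : Int)) 0 > 1)
      (fun k : Nat => ((k : Int) + 1) * ((s.length : Int) - 1 - (k : Int))),
    pvSumRange, zero_add]
  refine Finset.sum_congr rfl (fun k hk => ?_)
  simp only [Finset.mem_range] at hk
  rw [show (k : Int) + 1 = ((k + 1 : Nat) : Int) by push_cast; ring,
    PySem.List.pyGetD_natCast, PySem.List.pyGetD_natCast]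
  have hc : (((s.length - 1 : Nat)) : Int) = (s.length : Int) - 1 := by omega
  rw [hc]
  unfold pvGap
  split_ifs <;> ring

-- the core identity: A's else-branch triple loop equals B's weighted single pass, on ANY list
lemma pvMain (rank : List Int) :
    (PySem.List.pyRange 2
        (PySem.List.len (PySem.List.sorted rank (fun x => x) false) + 1) 1).foldl
      (fun res gl => pvWhile (PySem.List.sorted rank (fun x => x) false) gl 0 res
        ((PySem.List.len (PySem.List.sorted rank (fun x => x) false) + 1).toNat)) 0
      = findImbalance_alt rank := by
  rw [pvA_else, pvAlt_eq, pvCombine]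

lemma pvSorted_pair (a b : Int) :
    PySem.List.sorted [a, b] (fun x => x) false = if a ≤ b then [a, b] else [b, a] := by
  split_ifs with hab
  · exact PySem.List.sorted_eq_self_of_pairwise [a, b] (fun x => x) (by simp [hab])
  · exact PySem.List.sorted_eq_of_perm_of_pairwise_lt [a, b] [b, a] (fun x => x)
      (List.Perm.swap a b []) (by simp; omega)

-- ===== VERDICT (by name: the statement is the Claim_ definition above) =====
theorem findImbalance_spec : Claim_equal_findImbalance := by
  intro rank _
  show findImbalance rank = findImbalance_alt rank
  rcases rank with _ | ⟨a, _ | ⟨b, _ | ⟨c, t⟩⟩⟩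
  · -- []
    decide
  · -- [a]
    have hsa : PySem.List.sorted [a] (fun x => x) false = [a] :=
      PySem.List.sorted_eq_self_of_pairwise [a] (fun x => x) (by simp)
    rw [findImbalance, if_pos (by simp [PySem.List.len_eq])]
    rw [pvAlt_eq, hsa]
    simp
  · -- [a, b]
    rw [findImbalance,
      if_neg (by simp only [PySem.List.len_eq, List.length_cons, List.length_nil]; omega),
      if_pos (by simp only [PySem.List.len_eq, List.length_cons, List.length_nil]; omega)]
    have hg0 : PySem.List.pyGetD [a, b] 0 0 = a := rfl
    have hg1 : PySem.List.pyGetD [a, b] 1 0 = b := rfl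
    rw [hg0, hg1, pvAlt_eq, pvSorted_pair a b]
    have habs : |a - b| = if a ≤ b then b - a else a - b := by
      rcases abs_cases (a - b) with ⟨h1, h2⟩ | ⟨h1, h2⟩ <;> rw [h1] <;> split_ifs <;> omega
    by_cases hab : a ≤ b
    · rw [if_pos hab, habs, if_pos hab]
      simp [pvGap, List.getD]
    · rw [if_neg hab, habs, if_neg hab]
      simp [pvGap, List.getD]
  · -- length ≥ 3
    rw [findImbalance,
      if_neg (by simp only [PySem.List.len_eq, List.length_cons]; omega),
      if_neg (by simp only [PySem.List.len_eq, List.length_cons]; omega)]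
    exact pvMain (a :: b :: c :: t)
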